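-- pv_equiv track=rewrite | github.com/Jeff-Stoyanoff/Algo-Practice | codewars_6.py | largest_consec
-- ===== SOURCE A (Python) =====
-- def largest_consec(strarr, k):
--     new_arr = []
--
--     long_str = ""
--
--     if k <= 0:
--         return ""
--
--     for i in range(len(strarr) - k + 1):
--         str_combo = ""
--         for j in range(i, i + k):
--             str_combo += strarr[j]
--         new_arr.append(str_combo)
--
--     for i in new_arr:
--         if len(i) > len(long_str):
--             long_str = i
--
--     return long_str
-- ===== SOURCE B (Python) =====
-- def largest_consec(strarr, k):
--     if k <= 0 or k > len(strarr):
--         return ""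
--     pref = [0]
--     for s in strarr:
--         pref.append(pref[-1] + len(s))
--     best_i = 0
--     best_len = pref[k] - pref[0]
--     for i in range(1, len(strarr) - k + 1):
--         w = pref[i + k] - pref[i]
--         if w > best_len:
--             best_i = i
--             best_len = w
--     return "".join(strarr[best_i:best_i + k])
-- ===== Notes on version B (the rewrite author's own statement) =====
-- stated objective: faster
-- what changed: Instead of materialising every k-window concatenation and then scanning them, B builds prefix sums of the string lengths, finds the first index of maximal window length in one pass, and joins only that single window.
import Mathlib
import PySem

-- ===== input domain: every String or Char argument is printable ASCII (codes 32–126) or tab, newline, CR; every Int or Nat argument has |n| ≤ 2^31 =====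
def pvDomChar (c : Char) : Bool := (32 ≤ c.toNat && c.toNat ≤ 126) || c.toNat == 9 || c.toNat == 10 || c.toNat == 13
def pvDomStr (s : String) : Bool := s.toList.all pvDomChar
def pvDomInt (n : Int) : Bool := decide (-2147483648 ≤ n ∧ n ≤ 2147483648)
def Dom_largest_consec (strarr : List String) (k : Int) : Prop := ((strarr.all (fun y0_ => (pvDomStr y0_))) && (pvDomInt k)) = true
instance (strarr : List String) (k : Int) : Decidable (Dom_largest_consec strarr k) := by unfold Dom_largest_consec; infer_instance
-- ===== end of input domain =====

-- B replaces A's materialisation of every k-window concatenation by prefix sums of the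
-- string lengths (find the max-length window's index, build only that one window); faster.

-- ===== PORT A =====
def largest_consec (strarr : List String) (k : Int) : String :=
  if k ≤ 0 then ""
  else
    let new_arr : List String :=
      (PySem.List.pyRange 0 ((strarr.length : Int) - k + 1) 1).foldl
        (fun new_arr i =>
          new_arr ++ [(PySem.List.pyRange i (i + k) 1).foldl
            (fun str_combo j => str_combo ++ PySem.List.pyGetD strarr j "") ""])
        []
    new_arr.foldl
      (fun long_str i => if PySem.Str.len i > PySem.Str.len long_str then i else long_str) ""

-- ===== PORT B =====
def largest_consec_alt (strarr : List String) (k : Int) : String :=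
  if k ≤ 0 ∨ (strarr.length : Int) < k then ""
  else
    let pref : List Int :=
      strarr.foldl (fun pref s => pref ++ [PySem.List.pyGetD pref (-1) 0 + PySem.Str.len s]) [0]
    let best : Int × Int :=
      (PySem.List.pyRange 1 ((strarr.length : Int) - k + 1) 1).foldl
        (fun best i =>
          let w := PySem.List.pyGetD pref (i + k) 0 - PySem.List.pyGetD pref i 0
          if w > best.2 then (i, w) else best)
        (0, PySem.List.pyGetD pref k 0 - PySem.List.pyGetD pref 0 0)
    PySem.Str.join "" (PySem.List.slice strarr (some best.1) (some (best.1 + k)))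

-- ===== PRECONDITION & SPEC =====
def Spec_largest_consec (strarr : List String) (k : Int) (out : String) : Prop := out = largest_consec_alt strarr k
instance (strarr : List String) (k : Int) (out : String) : Decidable (Spec_largest_consec strarr k out) := by unfold Spec_largest_consec; infer_instance

-- ===== CLAIM (what is proved, stated in full; the proofs are below) =====
def Claim_equal_largest_consec : Prop := ∀ (strarr : List String) (k : Int), Dom_largest_consec strarr k → Spec_largest_consec strarr k (largest_consec strarr k)


-- ===== LEMMAS AND PROOFS =====

-- the concatenation of window [i, i+k) — what both programs select among
def pvWin (strarr : List String) (k i : Int) : String :=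
  PySem.Str.join "" (PySem.List.slice strarr (some i) (some (i + k)))

-- running prefix sums of lengths starting from a (B's pref list minus its head)
def pvPresum (a : Int) : List String → List Int
  | [] => []
  | s :: t => (a + PySem.Str.len s) :: pvPresum (a + PySem.Str.len s) t

lemma pv_str_ext {s t : String} (h : s.toList = t.toList) : s = t := by
  have := congrArg String.ofList h
  simpa using this

lemma pv_join_flatten (l : List String) :
    (PySem.Str.join "" l).toList = (l.map String.toList).flatten := by
  rw [PySem.Str.toList_join]
  show PySem.Chars.join [] (l.map String.toList) = _
  generalize l.map String.toList = ls
  induction ls with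
  | nil => simp [PySem.Chars.join_nil]
  | cons x t ih =>
    cases t with
    | nil => simp [PySem.Chars.join_singleton]
    | cons y u => rw [PySem.Chars.join_cons_cons]; simp_all

lemma pv_join_nil : PySem.Str.join "" ([] : List String) = "" := by
  apply pv_str_ext; rw [pv_join_flatten]; simp

lemma pv_join_cons (x : String) (l : List String) :
    PySem.Str.join "" (x :: l) = x ++ PySem.Str.join "" l := by
  apply pv_str_ext; rw [pv_join_flatten, String.toList_append, pv_join_flatten]; simp

lemma pv_len_join (l : List String) :
    PySem.Str.len (PySem.Str.join "" l) = (l.map PySem.Str.len).sum := by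
  induction l with
  | nil => simp [pv_join_nil]
  | cons x t ih => rw [pv_join_cons, PySem.Str.len_append, ih]; simp

lemma pv_len_zero {s : String} (h : PySem.Str.len s = 0) : s = "" := by
  apply pv_str_ext
  rw [PySem.Str.len_eq] at h
  simpa using h

lemma pv_slice_nil (xs : List String) (a b : Int) (h0 : 0 ≤ a) (h0b : 0 ≤ b) (h : b ≤ a) :
    PySem.List.slice xs (some a) (some b) = [] := by
  rw [PySem.List.slice_toNat _ h0 (by omega)]
  simp [show b.toNat - a.toNat = 0 by omega]

lemma pv_slice_cons (xs : List String) (a b : Int) (h : 0 ≤ a) (hb : a < b)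
    (hbl : b ≤ xs.length) :
    PySem.List.slice xs (some a) (some b)
      = PySem.List.pyGetD xs a "" :: PySem.List.slice xs (some (a+1)) (some b) := by
  rw [PySem.List.slice_toNat _ h (by omega), PySem.List.slice_toNat _ (by omega) (by omega),
    PySem.List.pyGetD_eq_getElem (h0 := h) (h1 := by omega)]
  rw [List.drop_eq_getElem_cons (by omega)]
  have h1 : a.toNat + 1 = (a+1).toNat := by omega
  have h2 : b.toNat - a.toNat = (b.toNat - (a+1).toNat) + 1 := by omega
  rw [h2, List.take_succ_cons, h1]

-- A's inner loop builds the window concatenation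
lemma pv_inner_fold (xs : List String) (m : Nat) :
    ∀ (a : Int) (c : String), 0 ≤ a → (xs.length : Int) ≥ a + m →
      ∀ (b : Int), 0 ≤ b → b ≤ xs.length → (b - a).toNat = m →
      (PySem.List.pyRange a b 1).foldl (fun s j => s ++ PySem.List.pyGetD xs j "") c
        = c ++ PySem.Str.join "" (PySem.List.slice xs (some a) (some b)) := by
  induction m with
  | zero =>
    intro a c ha _ b hb0 hb hm
    rw [PySem.List.pyRange_one_eq_nil (by omega), pv_slice_nil xs a b ha hb0 (by omega)]
    simp [pv_join_nil]
  | succ m ih =>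
    intro a c ha hlen b hb0 hb hm
    rw [PySem.List.pyRange_one_cons (by omega), List.foldl_cons]
    rw [ih (a+1) _ (by omega) (by omega) b hb0 hb (by omega)]
    rw [pv_slice_cons xs a b ha (by omega) hb, pv_join_cons, String.append_assoc]

-- B's pref-building loop appends the running prefix sums
lemma pv_pref_fold (xs : List String) :
    ∀ (p : List Int) (a : Int), p.getLast? = some a →
      xs.foldl (fun pref s => pref ++ [PySem.List.pyGetD pref (-1) 0 + PySem.Str.len s]) p
        = p ++ pvPresum a xs := by
  induction xs with
  | nil => intro p a _; simp [pvPresum]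
  | cons s t ih =>
    intro p a hlast
    have hne : p ≠ [] := by rintro rfl; simp at hlast
    have hget : PySem.List.pyGetD p (-1) 0 = a := by
      rw [PySem.List.pyGetD_neg_one (h := hne)]
      have := List.getLast?_eq_some_getLast (l := p) hne
      rw [this] at hlast; exact (Option.some.inj hlast)
    rw [List.foldl_cons, hget,
      ih (p ++ [a + PySem.Str.len s]) (a + PySem.Str.len s) (by simp)]
    simp [pvPresum]

lemma pv_presum_length (xs : List String) : ∀ a, (pvPresum a xs).length = xs.length := by
  induction xs with
  | nil => intro a; simp [pvPresum]
  | cons s t ih => intro a; simp [pvPresum, ih]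

lemma pv_presum_getElem? (xs : List String) :
    ∀ (a : Int) (t : Nat), t < xs.length →
      (pvPresum a xs)[t]? = some (a + ((xs.take (t+1)).map PySem.Str.len).sum) := by
  induction xs with
  | nil => intro a t h; simp at h
  | cons s u ih =>
    intro a t h
    cases t with
    | zero => simp [pvPresum]
    | succ t =>
      simp only [pvPresum, List.getElem?_cons_succ]
      rw [ih (a + PySem.Str.len s) t (by simpa using h)]
      simp [add_assoc]

-- lookup in B's pref list is the sum of the first i lengths
lemma pv_pref_get (xs : List String) (i : Int) (h0 : 0 ≤ i) (h1 : i ≤ xs.length) :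
    PySem.List.pyGetD (0 :: pvPresum 0 xs) i 0
      = ((xs.take i.toNat).map PySem.Str.len).sum := by
  have hlen : (0 :: pvPresum 0 xs).length = xs.length + 1 := by
    simp [pv_presum_length]
  have key : (0 :: pvPresum 0 xs)[i.toNat]?
      = some (((xs.take i.toNat).map PySem.Str.len).sum) := by
    cases hi : i.toNat with
    | zero => simp
    | succ t =>
      rw [List.getElem?_cons_succ, pv_presum_getElem? xs 0 t (by omega)]
      simp
  rw [PySem.List.pyGetD_eq_getElem (h0 := h0) (h1 := by omega)]
  have hlt : i.toNat < (0 :: pvPresum 0 xs).length := by omega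
  rw [List.getElem?_eq_getElem hlt] at key
  exact Option.some.inj key

-- length of the window concatenation as a difference of prefix sums
lemma pv_len_win (xs : List String) (k i : Int) (h0 : 0 ≤ i) (hk : 0 < k) :
    PySem.Str.len (pvWin xs k i)
      = ((xs.take (i+k).toNat).map PySem.Str.len).sum
        - ((xs.take i.toNat).map PySem.Str.len).sum := by
  unfold pvWin
  rw [pv_len_join, PySem.List.slice_toNat _ h0 (by omega)]
  have hsplit : (i+k).toNat = i.toNat + ((i+k).toNat - i.toNat) := by omega
  rw [hsplit, List.take_add]
  simp

-- the two selection loops walk the same index range in lockstep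
lemma pv_select (xs : List String) (k : Int) (hk : 0 < k) (m : Nat) :
    ∀ (a bi bl : Int), 0 ≤ a → ((xs.length : Int) - k + 1 - a).toNat = m →
      0 ≤ bi → bi + k ≤ xs.length → bl = PySem.Str.len (pvWin xs k bi) →
      (PySem.List.pyRange a ((xs.length : Int) - k + 1) 1).foldl
          (fun long_str i => if PySem.Str.len (pvWin xs k i) > PySem.Str.len long_str
            then pvWin xs k i else long_str) (pvWin xs k bi)
        = pvWin xs k (((PySem.List.pyRange a ((xs.length : Int) - k + 1) 1).foldl
            (fun best i =>
              if PySem.List.pyGetD (0 :: pvPresum 0 xs) (i + k) 0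
                    - PySem.List.pyGetD (0 :: pvPresum 0 xs) i 0 > best.2
              then (i, PySem.List.pyGetD (0 :: pvPresum 0 xs) (i + k) 0
                    - PySem.List.pyGetD (0 :: pvPresum 0 xs) i 0)
              else best) (bi, bl)).1) := by
  induction m with
  | zero =>
    intro a bi bl ha hm _ _ _
    rw [PySem.List.pyRange_one_eq_nil (by omega)]
    simp
  | succ m ih =>
    intro a bi bl ha hm hbi hbik hbl
    have hab : a < (xs.length : Int) - k + 1 := by omega
    rw [PySem.List.pyRange_one_cons hab, List.foldl_cons, List.foldl_cons]
    have hw : PySem.List.pyGetD (0 :: pvPresum 0 xs) (a + k) 0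
        - PySem.List.pyGetD (0 :: pvPresum 0 xs) a 0 = PySem.Str.len (pvWin xs k a) := by
      rw [pv_pref_get xs (a+k) (by omega) (by omega), pv_pref_get xs a (by omega) (by omega),
        pv_len_win xs k a ha hk]
    by_cases hcond : PySem.Str.len (pvWin xs k a) > PySem.Str.len (pvWin xs k bi)
    · have hc2 : (PySem.List.pyGetD (0 :: pvPresum 0 xs) (a + k) 0
          - PySem.List.pyGetD (0 :: pvPresum 0 xs) a 0) > bl := by rw [hw, hbl]; exact hcond
      simp only [if_pos hcond, if_pos hc2]
      exact ih (a+1) a _ (by omega) (by omega) ha (by omega) hw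
    · have hc2 : ¬ ((PySem.List.pyGetD (0 :: pvPresum 0 xs) (a + k) 0
          - PySem.List.pyGetD (0 :: pvPresum 0 xs) a 0) > bl) := by rw [hw, hbl]; exact hcond
      simp only [if_neg hcond, if_neg hc2]
      exact ih (a+1) bi bl (by omega) (by omega) hbi hbik hbl

-- ===== VERDICT (by name: the statement is the Claim_ definition above) =====
theorem largest_consec_spec : Claim_equal_largest_consec := by
  intro strarr k _
  unfold Spec_largest_consec largest_consec largest_consec_alt
  by_cases hk : k ≤ 0
  · simp [hk]
  · simp only [if_neg hk]
    by_cases hkn : (strarr.length : Int) < k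
    · rw [if_pos (Or.inr hkn), PySem.List.pyRange_one_eq_nil (by omega)]
      simp
    · rw [if_neg (by omega)]
      have hk0 : 0 < k := by omega
      have hM : 0 < (strarr.length : Int) - k + 1 := by omega
      have hpref : strarr.foldl
          (fun pref s => pref ++ [PySem.List.pyGetD pref (-1) 0 + PySem.Str.len s]) [0]
          = 0 :: pvPresum 0 strarr := by
        rw [pv_pref_fold strarr [0] 0 (by simp)]; simp
      have hmap : (PySem.List.pyRange 0 ((strarr.length:Int) - k + 1) 1).map
          (fun i => (PySem.List.pyRange i (i + k) 1).foldl
            (fun str_combo j => str_combo ++ PySem.List.pyGetD strarr j "") "")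
          = (PySem.List.pyRange 0 ((strarr.length:Int) - k + 1) 1).map (pvWin strarr k) := by
        apply List.map_congr_left
        intro i hi
        rw [PySem.List.mem_pyRange_one] at hi
        rw [pv_inner_fold strarr k.toNat i "" (by omega) (by omega) (i+k) (by omega)
          (by omega) (by omega)]
        simp [pvWin]
      simp only [PySem.List.foldl_append_singleton_eq_map, List.nil_append, hpref]
      rw [hmap, List.foldl_map]
      have hbl : PySem.List.pyGetD (0 :: pvPresum 0 strarr) k 0
          - PySem.List.pyGetD (0 :: pvPresum 0 strarr) 0 0
          = PySem.Str.len (pvWin strarr k 0) := by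
        rw [pv_pref_get strarr k (by omega) (by omega), pv_pref_get strarr 0 le_rfl (by omega),
          pv_len_win strarr k 0 le_rfl hk0]
        simp
      have hfirst : (if PySem.Str.len (pvWin strarr k 0) > PySem.Str.len "" then
          pvWin strarr k 0 else "") = pvWin strarr k 0 := by
        by_cases h : PySem.Str.len (pvWin strarr k 0) > PySem.Str.len ""
        · rw [if_pos h]
        · rw [if_neg h]
          have hz : PySem.Str.len (pvWin strarr k 0) = 0 := by
            rw [PySem.Str.len_eq] at h ⊢
            simp at h ⊢
            omega
          exact (pv_len_zero hz).symm
      rw [PySem.List.pyRange_one_cons hM, List.foldl_cons, hfirst,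
        show ((0:Int)+1) = 1 by norm_num]
      rw [pv_select strarr k hk0 ((strarr.length:Int) - k).toNat 1 0
        (PySem.List.pyGetD (0 :: pvPresum 0 strarr) k 0
          - PySem.List.pyGetD (0 :: pvPresum 0 strarr) 0 0)
        (by omega) (by omega) le_rfl (by omega) hbl]
      rfl
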